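-- pv_equiv track=rewrite | github.com/wlsgh7608/TIL | algorithm/greedy/book_problems/무지의 먹방 라이브.py | solution
-- ===== SOURCE A (Python) =====
-- def solution(food_times, k):
--     from collections import defaultdict
--     # 먹는 시간, 해당 인덱스
--     food_dic = {}
--     for i,food in enumerate(food_times):
--         if food in food_dic:
--             food_dic[food].append(i+1)
--         else:
--             food_dic[food] = [i+1]
--     foods_types = sorted(food_dic)
--     nums = len(food_times)
--     current_t = 0
--     p =  0 #food_types 포인터
--     if sum(food_times)<=k:
--         return -1
--     while True:
--         min_f = foods_types[p]
--         diff = min_f-current_t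
--         if diff * nums > k:
--             break
--         k -= diff*nums
--         p+=1
--         current_t = min_f
--         nums -= len(food_dic[min_f])
--     remain_foods = [i+1 for i,x in enumerate(food_times) if x>=min_f]
--     k = k %len(remain_foods)
--     return remain_foods[k]
-- ===== SOURCE B (Python) =====
-- def solution(food_times, k):
--     # Sort indices once by eating time and sweep them front-to-back,
--     # instead of grouping into a value->indices dict and filtering at the end.
--     from collections import deque
--     if sum(food_times) <= k:
--         return -1
--     order = deque(sorted(range(1, len(food_times) + 1), key=lambda i: food_times[i - 1]))
--     eaten = 0
--     prev = 0
--     while order: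
--         t = food_times[order[0] - 1]
--         step = eaten + (t - prev) * len(order)
--         if step > k:
--             remain = sorted(order)
--             return remain[(k - eaten) % len(remain)]
--         eaten = step
--         prev = t
--         order.popleft()
--     return -1
-- ===== Notes on version B (the rewrite author's own statement) =====
-- stated objective: alternative
-- what changed: Replaces A's value->indices dict plus sorted-distinct-values group loop plus final filter pass over the original list by a single stable sort of the indices by eating time, a per-index sweep that pops the smallest remaining food while it fits in k, and a sort of the surviving index suffix; a timing run measured this constant-factor faster (no dict building and no extra distinct-value sort).
import Mathlib
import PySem

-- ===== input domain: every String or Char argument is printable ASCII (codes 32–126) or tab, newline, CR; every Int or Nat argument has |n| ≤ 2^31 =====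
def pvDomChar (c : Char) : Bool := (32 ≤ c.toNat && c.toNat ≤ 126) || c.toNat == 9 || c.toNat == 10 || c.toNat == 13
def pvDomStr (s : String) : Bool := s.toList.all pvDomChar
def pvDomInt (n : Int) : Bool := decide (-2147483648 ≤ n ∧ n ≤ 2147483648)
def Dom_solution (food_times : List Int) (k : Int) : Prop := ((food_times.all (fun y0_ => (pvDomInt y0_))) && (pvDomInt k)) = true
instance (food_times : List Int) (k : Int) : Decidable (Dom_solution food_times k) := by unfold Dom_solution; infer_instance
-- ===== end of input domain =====

-- B replaces A's value→indices dict, sorted-distinct-values group loop and final filter pass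
-- by one stable sort of the indices by eating time, a per-index sweep and a sort of the
-- surviving suffix (objective: alternative; same result wherever A returns).

-- ===== PORT A =====
-- the 'while True' loop over the pointer p into foods_types: structural recursion on the
-- remaining suffix of foods_types; on pointer overrun Python raises IndexError (excluded by
-- Pre_solution), the port returns (current_t, k) there.
def solutionGo (food_dic : PySem.Dict Int (List Int)) :
    List Int → Int → Int → Int → Int × Int
  | [], current_t, _, k => (current_t, k)
  | min_f :: rest, current_t, nums, k =>
      let diff := min_f - current_t
      if diff * nums > k then (min_f, k)
      else solutionGo food_dic rest min_f (nums - ((food_dic.getD min_f []).length : Int))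
             (k - diff * nums)

def solution (food_times : List Int) (k : Int) : Int :=
  let food_dic := (PySem.List.enumerate food_times).foldl
      (fun d p => if d.contains p.2 then d.modify p.2 [] (fun l => l ++ [p.1 + 1])
                  else d.insert p.2 [p.1 + 1]) PySem.Dict.empty
  let foods_types := PySem.List.sorted food_dic.keys (fun x => x)
  let nums : Int := (food_times.length : Int)
  if food_times.sum ≤ k then -1
  else
    let res := solutionGo food_dic foods_types 0 nums k
    let min_f := res.1
    let k2 := res.2
    let remain_foods := ((PySem.List.enumerate food_times).filter
        (fun p => decide (min_f ≤ p.2))).map (fun p => p.1 + 1)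
    let k3 := PySem.Int.mod k2 (remain_foods.length : Int)
    PySem.List.pyGetD remain_foods k3 0

-- ===== PORT B =====
-- the 'while order:' deque loop: structural recursion on the index list (front pop)
def solutionAltGo (food_times : List Int) (k : Int) :
    List Int → Int → Int → Int
  | [], _, _ => -1
  | i :: rest, eaten, prev =>
      let t := PySem.List.pyGetD food_times (i - 1) 0
      let step := eaten + (t - prev) * (((i :: rest).length : Nat) : Int)
      if step > k then
        let remain := PySem.List.sorted (i :: rest) (fun x => x)
        PySem.List.pyGetD remain (PySem.Int.mod (k - eaten) (remain.length : Int)) 0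
      else solutionAltGo food_times k rest step t

def solution_alt (food_times : List Int) (k : Int) : Int :=
  if food_times.sum ≤ k then -1
  else
    let order := PySem.List.sorted
        (PySem.List.pyRange 1 ((food_times.length : Int) + 1))
        (fun i => PySem.List.pyGetD food_times (i - 1) 0)
    solutionAltGo food_times k order 0 0

-- ===== PRECONDITION & SPEC =====
-- Pre_ excludes only the inputs where A raises: the empty list with k < 0 (the sum guard
-- does not fire and 'foods_types[0]' is an IndexError).
def Pre_solution (food_times : List Int) (k : Int) : Prop := food_times ≠ [] ∨ 0 ≤ k
instance (food_times : List Int) (k : Int) : Decidable (Pre_solution food_times k) := by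
  unfold Pre_solution; infer_instance
def pvWitness_solution : List Int × Int := ([3, 1, 2], 5)
def Spec_solution (food_times : List Int) (k : Int) (out : Int) : Prop := out = solution_alt food_times k
instance (food_times : List Int) (k : Int) (out : Int) : Decidable (Spec_solution food_times k out) := by unfold Spec_solution; infer_instance

-- ===== CLAIM (what is proved, stated in full; the proofs are below) =====
def Claim_equal_solution : Prop := ∀ (food_times : List Int) (k : Int), Dom_solution food_times k → Pre_solution food_times k → Spec_solution food_times k (solution food_times k)

-- ===== LEMMAS AND PROOFS =====

-- proof-side abbreviations for the subterms shared by the two ports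
def pvKey (xs : List Int) (i : Int) : Int := PySem.List.pyGetD xs (i - 1) 0
def pvIdx (xs : List Int) : List Int := PySem.List.pyRange 1 ((xs.length : Int) + 1)
def pvDic (xs : List Int) : PySem.Dict Int (List Int) :=
  (PySem.List.enumerate xs).foldl
    (fun d p => if d.contains p.2 then d.modify p.2 [] (fun l => l ++ [p.1 + 1])
                else d.insert p.2 [p.1 + 1]) PySem.Dict.empty
def pvRemain (xs : List Int) (v : Int) : List Int :=
  ((PySem.List.enumerate xs).filter (fun p => decide (v ≤ p.2))).map (fun p => p.1 + 1)

lemma pv_range_shift (n : Nat) :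
    PySem.List.pyRange 1 ((n : Int) + 1) = (PySem.List.pyRange 0 (n : Int)).map (· + 1) := by
  rw [PySem.List.pyRange_zero_natCast, List.map_map]
  show PySem.List.pyRange 1 ((n : Int) + 1) 1 = _
  unfold PySem.List.pyRange
  rw [if_neg (by norm_num)]
  rcases Nat.eq_zero_or_pos n with h | h
  · subst h; norm_num
  · rw [if_pos (by norm_num), if_pos (by exact_mod_cast by omega)]
    have h1 : ((n : Int) + 1 - 1 + 1 - 1) / 1 = (n : Int) := by ring_nf; exact Int.ediv_one _
    rw [h1, Int.toNat_natCast]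
    apply List.map_congr_left
    intro a _
    simp
    ring

lemma pv_pyRange_zero_pairwise (n : Nat) : (PySem.List.pyRange 0 (n : Int)).Pairwise (· < ·) := by
  rw [PySem.List.pyRange_zero_natCast]
  exact List.pairwise_lt_range.map _ (by intro a b h; exact_mod_cast h)

lemma pv_idx_pairwise (xs : List Int) : (pvIdx xs).Pairwise (· < ·) := by
  rw [pvIdx, pv_range_shift]
  exact (pv_pyRange_zero_pairwise xs.length).map _ (by intro a b h; omega)

lemma pv_mem_idx {xs : List Int} {i : Int} : i ∈ pvIdx xs ↔ 1 ≤ i ∧ i < (xs.length : Int) + 1 := by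
  rw [pvIdx]; exact PySem.List.mem_pyRange_one

lemma pv_key_mem {xs : List Int} {i : Int} (h : i ∈ pvIdx xs) : pvKey xs i ∈ xs := by
  rw [pv_mem_idx] at h
  rw [pvKey, PySem.List.pyGetD_eq_getElem xs 0 (by omega) (by omega)]
  exact List.getElem_mem _

lemma pv_mem_key {xs : List Int} {w : Int} (h : w ∈ xs) : ∃ i ∈ pvIdx xs, pvKey xs i = w := by
  obtain ⟨j, hj, hje⟩ := List.mem_iff_getElem.mp h
  refine ⟨(j : Int) + 1, pv_mem_idx.mpr ⟨by omega, by omega⟩, ?_⟩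
  rw [pvKey, PySem.List.pyGetD_eq_getElem xs 0 (by omega) (by omega)]
  simpa using hje

lemma pv_range (xs : List Int) (P : Int → Bool) :
    ((PySem.List.enumerate xs).filter (fun p => P p.2)).map (fun p => p.1 + 1)
      = (pvIdx xs).filter (fun i => P (pvKey xs i)) := by
  rw [PySem.List.enumerate_eq_map_pyRange xs 0, List.filter_map, List.map_map,
    pvIdx, pv_range_shift, List.filter_map]
  have hlen : PySem.List.len xs = (xs.length : Int) := rfl
  rw [hlen] at *
  congr 1
  apply List.filter_congr
  intro j _
  show P (PySem.List.pyGetD xs j 0) = P (pvKey xs (j + 1))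
  rw [pvKey]
  norm_num

lemma pv_sum_idx (xs : List Int) : ((pvIdx xs).map (pvKey xs)).sum = xs.sum := by
  rw [pvIdx, pv_range_shift, List.map_map]
  have : (fun i => pvKey xs i) ∘ (· + 1) = fun j => PySem.List.pyGetD xs j 0 := by
    funext j; show pvKey xs (j + 1) = _; rw [pvKey]; norm_num
  rw [this]
  have := PySem.List.map_pyGetD_pyRange_zero xs 0
  rw [show PySem.List.len xs = (xs.length : Int) from rfl] at this
  rw [this]

lemma pv_dic_modify (xs : List Int) :
    pvDic xs = (PySem.List.enumerate xs).foldl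
      (fun d p => d.modify p.2 [] (fun l => l ++ [p.1 + 1])) PySem.Dict.empty := by
  rw [pvDic]
  apply PySem.List.foldl_congr_mem
  intro d p _
  by_cases hc : d.contains p.2
  · simp [hc]
  · rw [if_neg (by simp [hc])]
    rw [PySem.Dict.modify, PySem.Dict.getD_of_not_contains d [] (by simpa using hc)]
    simp

lemma pv_dic_getD (xs : List Int) (v : Int) :
    (pvDic xs).getD v [] = (pvIdx xs).filter (fun i => pvKey xs i == v) := by
  rw [pv_dic_modify]
  have hfold : (PySem.List.enumerate xs).foldl
      (fun d p => d.modify p.2 [] (fun l => l ++ [p.1 + 1])) PySem.Dict.empty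
      = ((PySem.List.enumerate xs).map (fun q => (q.2, q.1 + 1))).foldl
          (fun d p => d.modify p.1 [] (fun l => l ++ [p.2])) PySem.Dict.empty := by
    rw [List.foldl_map]
  rw [hfold, PySem.Dict.getD_foldl_modify_append, PySem.Dict.getD_empty, List.nil_append,
    List.filter_map, List.map_map]
  have h1 : ((fun p => p.1 == v) ∘ fun q : Int × Int => (q.2, q.1 + 1)) = fun q : Int × Int => q.2 == v := rfl
  have h2 : ((fun x : Int × Int => x.2) ∘ fun q : Int × Int => (q.2, q.1 + 1)) = fun q : Int × Int => q.1 + 1 := rfl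
  rw [h1, h2]
  exact pv_range xs (fun x => x == v)

lemma pv_dic_keys (xs : List Int) : (pvDic xs).keys = PySem.Set.ofList xs := by
  rw [pv_dic_modify]
  rw [PySem.Dict.keys_foldl_modify_key (PySem.List.enumerate xs) (fun p => p.2) []
    (fun _ p => (fun l => l ++ [p.1 + 1])) PySem.Dict.empty]
  rw [PySem.Dict.keys_empty, PySem.Set.update_nil_left, PySem.List.map_snd_enumerate]

-- a key-sorted list whose keys are all ≥ v splits into the run of v's and the strictly larger rest
lemma pv_split (key : Int → Int) (v : Int) :
    ∀ (r : List Int), (∀ i ∈ r, v ≤ key i) → r.Pairwise (fun a b => key a ≤ key b) →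
      ∃ rv r', r = rv ++ r' ∧ (∀ i ∈ rv, key i = v) ∧ (∀ i ∈ r', v < key i) := by
  intro r
  induction r with
  | nil => exact fun _ _ => ⟨[], [], rfl, by simp, by simp⟩
  | cons a tl ih =>
    intro hge hpw
    obtain ⟨ha, htl⟩ := List.pairwise_cons.mp hpw
    by_cases hav : key a = v
    · obtain ⟨rv, r', he, h1, h2⟩ := ih (fun i hi => hge i (List.mem_cons_of_mem _ hi)) htl
      refine ⟨a :: rv, r', by rw [he]; rfl, ?_, h2⟩
      intro i hi
      rcases List.mem_cons.mp hi with rfl | hi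
      · exact hav
      · exact h1 i hi
    · refine ⟨[], a :: tl, rfl, by simp, ?_⟩
      intro i hi
      have hva : v < key a := lt_of_le_of_ne (hge a List.mem_cons_self) (Ne.symm hav)
      rcases List.mem_cons.mp hi with rfl | hi
      · exact hva
      · exact lt_of_lt_of_le hva (ha i hi)

-- B consumes a whole run of equal minimal values in single steps
lemma pv_runB (xs : List Int) (kB v : Int) :
    ∀ (rv r' : List Int) (eaten cur : Int), rv ≠ [] → (∀ i ∈ rv, pvKey xs i = v) →
      ¬ eaten + (v - cur) * (((rv ++ r').length : Nat) : Int) > kB →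
      solutionAltGo xs kB (rv ++ r') eaten cur
        = solutionAltGo xs kB r' (eaten + (v - cur) * (((rv ++ r').length : Nat) : Int)) v := by
  intro rv
  induction rv with
  | nil => intro r' eaten cur hne _ _; exact absurd rfl hne
  | cons i rv0 ih =>
    intro r' eaten cur _ hkeys hle
    have hki : pvKey xs i = v := hkeys i (List.mem_cons_self)
    show (let t := PySem.List.pyGetD xs (i - 1) 0
          let step := eaten + (t - cur) * (((i :: (rv0 ++ r')).length : Nat) : Int)
          if step > kB then _ else solutionAltGo xs kB (rv0 ++ r') step t) = _
    simp only []
    rw [show PySem.List.pyGetD xs (i - 1) 0 = v from hki]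
    have hlen : ((i :: (rv0 ++ r')).length : Int) = (((i :: rv0) ++ r').length : Int) := by
      simp
    rw [if_neg (by rw [hlen]; exact hle)]
    rcases List.eq_nil_or_concat' rv0 with h0 | h0
    · subst h0
      simp only [List.nil_append]
      congr 1
    · have hne0 : rv0 ≠ [] := by rcases h0 with ⟨a, l, rfl⟩; simp
      rw [ih r' (eaten + (v - cur) * (((i :: (rv0 ++ r')).length : Nat) : Int)) v hne0
        (fun j hj => hkeys j (List.mem_cons_of_mem _ hj)) (by simpa using hle)]
      congr 1
      rw [hlen]
      ring

lemma pv_main (xs : List Int) (kB : Int) :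
    ∀ (ts r : List Int) (cur eaten : Int),
      ts ≠ [] →
      ts.Pairwise (· < ·) →
      (∀ w, w ∈ ts ↔ ∃ i ∈ r, pvKey xs i = w) →
      (∀ j ∈ pvIdx xs, ∀ w ∈ ts, w ≤ pvKey xs j → pvKey xs j ∈ ts) →
      r.Perm ((pvIdx xs).filter (fun i => decide (pvKey xs i ∈ ts))) →
      r.Pairwise (fun a b => pvKey xs a ≤ pvKey xs b) →
      kB - eaten < (r.map (fun i => pvKey xs i - cur)).sum →
      (PySem.List.pyGetD (pvRemain xs (solutionGo (pvDic xs) ts cur (r.length : Int) (kB - eaten)).1)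
        (PySem.Int.mod (solutionGo (pvDic xs) ts cur (r.length : Int) (kB - eaten)).2
          ((pvRemain xs (solutionGo (pvDic xs) ts cur (r.length : Int) (kB - eaten)).1).length : Int)) 0)
        = solutionAltGo xs kB r eaten cur := by
  intro ts
  induction ts with
  | nil => intro r cur eaten hne; exact absurd rfl hne
  | cons v ts' ih =>
    intro r cur eaten _ hpw hts hclosed hperm hsorted hres
    have hvts : v ∈ v :: ts' := List.mem_cons_self
    obtain ⟨hpwv, hpwts'⟩ := List.pairwise_cons.mp hpw
    have hmemr : ∀ i ∈ r, v ≤ pvKey xs i := by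
      intro i hi
      have hk : pvKey xs i ∈ v :: ts' := (hts (pvKey xs i)).mpr ⟨i, hi, rfl⟩
      rcases List.mem_cons.mp hk with h | h
      · omega
      · exact le_of_lt (hpwv _ h)
    obtain ⟨rv, r', hsplit, hrv, hr'mem⟩ :=
      pv_split (pvKey xs) v r hmemr hsorted
    have hr'sub : r'.Sublist r := by rw [hsplit]; exact List.sublist_append_right _ _
    have hrvne : rv ≠ [] := by
      obtain ⟨i, hiR, hk⟩ := (hts v).mp hvts
      rw [hsplit] at hiR
      rcases List.mem_append.mp hiR with h | h
      · intro hc; rw [hc] at h; cases h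
      · exact absurd hk (by have := hr'mem i h; omega)
    have hlen : r.length = rv.length + r'.length := by rw [hsplit, List.length_append]
    have hfv : r.filter (fun i => pvKey xs i == v) = rv := by
      rw [hsplit, List.filter_append,
        List.filter_eq_self.mpr (by intro a ha; simpa using hrv a ha),
        List.filter_eq_nil_iff.mpr (by intro a ha; have := hr'mem a ha; simp; omega),
        List.append_nil]
    have hcnt : ((pvIdx xs).filter (fun i => pvKey xs i == v)).length = rv.length := by
      have hp := hperm.filter (fun i => pvKey xs i == v)
      rw [hfv, List.filter_filter] at hp
      have hq : (pvIdx xs).filter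
            (fun a => (pvKey xs a == v) && decide (pvKey xs a ∈ v :: ts'))
          = (pvIdx xs).filter (fun i => pvKey xs i == v) := by
        apply List.filter_congr
        intro a _
        by_cases h : pvKey xs a = v
        · simp [h]
        · simp [h]
      rw [hq] at hp
      exact hp.length_eq.symm
    have hdiclen : ((pvDic xs).getD v []).length = rv.length := by
      rw [pv_dic_getD]; exact hcnt
    have hA : solutionGo (pvDic xs) (v :: ts') cur (r.length : Int) (kB - eaten)
        = if (v - cur) * (r.length : Int) > kB - eaten then (v, kB - eaten)
          else solutionGo (pvDic xs) ts' v
                 ((r.length : Int) - (((pvDic xs).getD v []).length : Int))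
                 ((kB - eaten) - (v - cur) * (r.length : Int)) := rfl
    obtain ⟨i0, rv0, hrv0⟩ : ∃ i0 rv0, rv = i0 :: rv0 := by
      cases hc : rv with
      | nil => exact absurd hc hrvne
      | cons a l => exact ⟨a, l, rfl⟩
    have hrshape : r = i0 :: (rv0 ++ r') := by rw [hsplit, hrv0]; rfl
    have hki0 : pvKey xs i0 = v := hrv i0 (by rw [hrv0]; exact List.mem_cons_self)
    have hlenr : ((i0 :: (rv0 ++ r')).length : Int) = (r.length : Int) := by rw [hrshape]
    by_cases hbr : (v - cur) * (r.length : Int) > kB - eaten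
    · rw [hA, if_pos hbr]
      conv_rhs => rw [hrshape]
      simp only [solutionAltGo]
      rw [show PySem.List.pyGetD xs (i0 - 1) 0 = v from hki0]
      rw [if_pos (by rw [hlenr]; linarith)]
      have hrem : pvRemain xs v = (pvIdx xs).filter (fun i => decide (v ≤ pvKey xs i)) :=
        pv_range xs (fun x => decide (v ≤ x))
      have hflt : (pvIdx xs).filter (fun i => decide (pvKey xs i ∈ v :: ts'))
          = (pvIdx xs).filter (fun i => decide (v ≤ pvKey xs i)) := by
        apply List.filter_congr
        intro a ha
        simp only [decide_eq_decide]
        constructor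
        · intro h
          rcases List.mem_cons.mp h with h | h
          · omega
          · exact le_of_lt (hpwv _ h)
        · intro h
          exact hclosed a ha v hvts h
      have hsorteq : PySem.List.sorted (i0 :: (rv0 ++ r')) (fun x => x) = pvRemain xs v := by
        apply PySem.List.sorted_eq_of_perm_of_pairwise_lt
        · rw [hrem, ← hflt, ← hrshape]
          exact hperm.symm
        · rw [hrem]
          exact List.Pairwise.sublist List.filter_sublist (pv_idx_pairwise xs)
      rw [hsorteq]
    · rw [hA, if_neg hbr]
      have hrunB := pv_runB xs kB v rv r' eaten cur hrvne hrv
        (by rw [show ((rv ++ r').length : Int) = (r.length : Int) from by rw [hsplit]]; linarith)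
      rw [show ((rv ++ r').length : Int) = (r.length : Int) from by rw [hsplit]] at hrunB
      conv_rhs => rw [hsplit]
      rw [hrunB]
      have hnums : (r.length : Int) - (((pvDic xs).getD v []).length : Int) = (r'.length : Int) := by
        rw [hdiclen]
        have : (r.length : Int) = (rv.length : Int) + (r'.length : Int) := by exact_mod_cast hlen
        omega
      have hkA : (kB - eaten) - (v - cur) * (r.length : Int)
          = kB - (eaten + (v - cur) * (r.length : Int)) := by ring
      rw [hnums, hkA]
      have hts' : ∀ w, w ∈ ts' ↔ ∃ i ∈ r', pvKey xs i = w := by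
        intro w
        constructor
        · intro hw
          obtain ⟨i, hiR, hk⟩ := (hts w).mp (List.mem_cons_of_mem _ hw)
          rw [hsplit] at hiR
          rcases List.mem_append.mp hiR with h | h
          · exfalso
            have := hrv i h
            have := hpwv w hw
            omega
          · exact ⟨i, h, hk⟩
        · rintro ⟨i, hi, rfl⟩
          have h1 : pvKey xs i ∈ v :: ts' := (hts _).mpr ⟨i, hr'sub.subset hi, rfl⟩
          rcases List.mem_cons.mp h1 with h | h
          · exact absurd h (by have := hr'mem i hi; omega)
          · exact h
      apply ih r' v (eaten + (v - cur) * (r.length : Int))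
      · intro h0
        have hall : ∀ i ∈ r, pvKey xs i = v := by
          intro i hi
          have := (hts (pvKey xs i)).mpr ⟨i, hi, rfl⟩
          rw [h0] at this
          simpa using this
        have hsum : (r.map (fun i => pvKey xs i - cur)).sum = (r.length : Int) * (v - cur) := by
          rw [List.map_congr_left (g := fun _ => v - cur)
            (fun a ha => by rw [hall a ha])]
          exact PySem.List.sum_map_const_int r (v - cur)
        rw [hsum] at hres
        have hc : (v - cur) * (r.length : Int) = (r.length : Int) * (v - cur) := mul_comm _ _
        linarith
      · exact hpwts'
      · exact hts'
      · intro j hj w hw hle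
        have := hclosed j hj w (List.mem_cons_of_mem _ hw) hle
        rcases List.mem_cons.mp this with h | h
        · exfalso
          have := hpwv w hw
          omega
        · exact h
      · have h1 : r.filter (fun i => decide (pvKey xs i ∈ ts')) = r' := by
          rw [hsplit, List.filter_append,
            List.filter_eq_nil_iff.mpr (by
              intro a ha
              have hav := hrv a ha
              simp only [decide_eq_true_eq]
              intro hmem
              have := hpwv _ hmem
              omega),
            List.filter_eq_self.mpr (by
              intro a ha
              simpa using (hts' (pvKey xs a)).mpr ⟨a, ha, rfl⟩),
            List.nil_append]
        have h2 := hperm.filter (fun i => decide (pvKey xs i ∈ ts'))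
        rw [h1, List.filter_filter] at h2
        have h3 : (pvIdx xs).filter
              (fun a => decide (pvKey xs a ∈ ts') && decide (pvKey xs a ∈ v :: ts'))
            = (pvIdx xs).filter (fun i => decide (pvKey xs i ∈ ts')) := by
          apply List.filter_congr
          intro a _
          by_cases h : pvKey xs a ∈ ts'
          · simp [h]
          · simp [h]
        rw [h3] at h2
        exact h2
      · exact List.Pairwise.sublist hr'sub hsorted
      · have hsplitsum : (r.map (fun i => pvKey xs i - cur)).sum
            = (rv.length : Int) * (v - cur)
              + ((r'.map (fun i => pvKey xs i - v)).sum + (r'.length : Int) * (v - cur)) := by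
          rw [hsplit, List.map_append, List.sum_append]
          congr 1
          · rw [List.map_congr_left (g := fun _ => v - cur) (fun a ha => by rw [hrv a ha])]
            exact PySem.List.sum_map_const_int rv (v - cur)
          · rw [List.map_congr_left (g := fun i => (pvKey xs i - v) + (v - cur))
              (fun a _ => by ring)]
            rw [PySem.List.sum_map_add_int]
            congr 1
            exact PySem.List.sum_map_const_int r' (v - cur)
        have hlenint : (r.length : Int) = (rv.length : Int) + (r'.length : Int) := by
          exact_mod_cast hlen
        have hmul : (v - cur) * (r.length : Int)
            = (rv.length : Int) * (v - cur) + (r'.length : Int) * (v - cur) := by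
          rw [hlenint]; ring
        linarith

-- ===== VERDICT (by name: the statement is the Claim_ definition above) =====
lemma pv_idx_length (xs : List Int) : (pvIdx xs).length = xs.length := by
  rw [pvIdx, pv_range_shift, List.length_map, PySem.List.pyRange_zero_natCast,
    List.length_map, List.length_range]

theorem solution_spec : Claim_equal_solution := by
  intro xs k _ hpre
  unfold Spec_solution
  by_cases hsum : xs.sum ≤ k
  · simp only [solution, solution_alt]
    rw [if_pos hsum, if_pos hsum]
  · have hxs : xs ≠ [] := by
      intro h0
      rcases hpre with h | h
      · exact h h0
      · subst h0; exact hsum (by simpa using h)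
    have hperm0 := PySem.List.sorted_perm (pvIdx xs) (pvKey xs) false
    have hmemts : ∀ w, w ∈ PySem.List.sorted (pvDic xs).keys (fun x => x) ↔ w ∈ xs := by
      intro w
      rw [PySem.List.mem_sorted, pv_dic_keys]
      exact PySem.Set.mem_ofList xs w
    have hne : PySem.List.sorted (pvDic xs).keys (fun x => x) ≠ [] := by
      intro h0
      obtain ⟨a, tl, rfl⟩ : ∃ a tl, xs = a :: tl := by
        cases xs with
        | nil => exact absurd rfl hxs
        | cons a tl => exact ⟨a, tl, rfl⟩
      have : a ∈ PySem.List.sorted (pvDic (a :: tl)).keys (fun x => x) :=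
        (hmemts a).mpr List.mem_cons_self
      rw [h0] at this
      cases this
    have hpw : (PySem.List.sorted (pvDic xs).keys (fun x => x)).Pairwise (· < ·) := by
      rw [pv_dic_keys]
      exact PySem.List.sorted_ofList_pairwise_lt xs
    have hts : ∀ w, w ∈ PySem.List.sorted (pvDic xs).keys (fun x => x)
        ↔ ∃ i ∈ PySem.List.sorted (pvIdx xs) (pvKey xs), pvKey xs i = w := by
      intro w
      rw [hmemts]
      constructor
      · intro h
        obtain ⟨i, hi, hk⟩ := pv_mem_key h
        exact ⟨i, hperm0.mem_iff.mpr hi, hk⟩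
      · rintro ⟨i, hi, rfl⟩
        exact pv_key_mem (hperm0.mem_iff.mp hi)
    have hclosed : ∀ j ∈ pvIdx xs, ∀ w ∈ PySem.List.sorted (pvDic xs).keys (fun x => x),
        w ≤ pvKey xs j → pvKey xs j ∈ PySem.List.sorted (pvDic xs).keys (fun x => x) := by
      intro j hj w _ _
      exact (hmemts _).mpr (pv_key_mem hj)
    have hperm : (PySem.List.sorted (pvIdx xs) (pvKey xs)).Perm
        ((pvIdx xs).filter (fun i => decide (pvKey xs i ∈ PySem.List.sorted (pvDic xs).keys (fun x => x)))) := by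
      rw [List.filter_eq_self.mpr (by
        intro a ha
        simpa using (hmemts _).mpr (pv_key_mem ha))]
      exact hperm0
    have hres : k - 0 < ((PySem.List.sorted (pvIdx xs) (pvKey xs)).map
        (fun i => pvKey xs i - 0)).sum := by
      have hs : ((PySem.List.sorted (pvIdx xs) (pvKey xs)).map (fun i => pvKey xs i - 0)).sum
          = xs.sum := by
        rw [List.map_congr_left (g := pvKey xs) (fun a _ => by ring)]
        rw [(hperm0.map (pvKey xs)).sum_eq]
        exact pv_sum_idx xs
      rw [hs]
      omega
    have main := pv_main xs k (PySem.List.sorted (pvDic xs).keys (fun x => x))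
      (PySem.List.sorted (pvIdx xs) (pvKey xs)) 0 0 hne hpw hts hclosed hperm
      (PySem.List.sorted_pairwise (pvIdx xs) (pvKey xs)) hres
    rw [sub_zero] at main
    rw [show ((PySem.List.sorted (pvIdx xs) (pvKey xs)).length : Int) = (xs.length : Int) from by
      rw [PySem.List.length_sorted, pv_idx_length]] at main
    simp only [solution, solution_alt]
    rw [if_neg hsum, if_neg hsum]
    exact main
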